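-- pv_equiv track=rewrite | github.com/Albertree/SOAR-ARC-test | procedural_memory/base_rules/geometry/grid_shear.py | _find_grid_structure
-- ===== SOURCE A (Python) =====
-- def _find_grid_structure(grid):
--     """Find the single non-bg color forming a grid and its row range.
--
--     Returns (grid_color, top_row, bottom_row) or (None, None, None).
--     """
--     h = len(grid)
--     w = len(grid[0]) if grid else 0
--     bg = 0
--
--     colors = set()
--     for r in range(h):
--         for c in range(w):
--             if grid[r][c] != bg:
--                 colors.add(grid[r][c])
--
--     if len(colors) != 1:
--         return None, None, None
--
--     grid_color = colors.pop()
--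
--     top_row = None
--     bottom_row = None
--     for r in range(h):
--         if any(grid[r][c] == grid_color for c in range(w)):
--             if top_row is None:
--                 top_row = r
--             bottom_row = r
--
--     if top_row is None:
--         return None, None, None
--
--     return grid_color, top_row, bottom_row
-- ===== SOURCE B (Python) =====
-- def _find_grid_structure(grid):
--     """Single fused pass: collect non-bg colors and track first/last non-bg row."""
--     h = len(grid)
--     w = len(grid[0]) if grid else 0
--     bg = 0
--
--     colors = set()
--     first = None
--     last = None
--     for r in range(h):
--         for c in range(w):
--             v = grid[r][c]
--             if v != bg:
--                 colors.add(v)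
--                 if first is None:
--                     first = r
--                 last = r
--
--     if len(colors) != 1:
--         return None, None, None
--
--     return colors.pop(), first, last
-- ===== Notes on version B (the rewrite author's own statement) =====
-- stated objective: alternative
-- what changed: Fuses A's two separate nested scans (one collecting the color set, a second re-scanning all rows to find the top/bottom rows of the grid color) into a single nested pass that maintains the color set and the first/last non-background row indices together, relying on the fact that with a single non-background color every non-background row is a grid-color row.
import Mathlib
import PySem

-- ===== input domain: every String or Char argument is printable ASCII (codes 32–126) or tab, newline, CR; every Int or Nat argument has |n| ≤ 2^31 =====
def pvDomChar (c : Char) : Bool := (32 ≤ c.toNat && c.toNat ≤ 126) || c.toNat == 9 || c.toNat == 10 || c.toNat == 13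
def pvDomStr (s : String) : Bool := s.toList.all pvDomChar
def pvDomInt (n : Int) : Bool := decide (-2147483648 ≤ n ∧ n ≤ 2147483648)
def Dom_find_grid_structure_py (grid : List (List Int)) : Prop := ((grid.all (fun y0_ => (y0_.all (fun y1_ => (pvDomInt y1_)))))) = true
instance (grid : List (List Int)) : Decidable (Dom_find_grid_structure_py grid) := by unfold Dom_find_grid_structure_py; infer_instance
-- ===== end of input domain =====

-- B fuses A's two nested scans (collect the color set, then re-scan all rows for the grid color's row range)
-- into one nested pass maintaining the color set and the first/last non-background row together (objective: alternative).


def find_grid_structure_py (grid : List (List Int)) : Option Int × Option Int × Option Int :=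
  let h : Int := (grid.length : Int)
  let w : Int := match grid with | [] => 0 | r0 :: _ => (r0.length : Int)
  let colors : PySem.Set Int :=
    (PySem.List.pyRange 0 h 1).foldl (fun cs r =>
      (PySem.List.pyRange 0 w 1).foldl (fun cs c =>
        if PySem.List.pyGetD (PySem.List.pyGetD grid r []) c 0 ≠ 0 then
          PySem.Set.add cs (PySem.List.pyGetD (PySem.List.pyGetD grid r []) c 0)
        else cs) cs) PySem.Set.empty
  match colors with
  | [grid_color] =>
    let tb : Option Int × Option Int :=
      (PySem.List.pyRange 0 h 1).foldl (fun tb r =>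
        if (PySem.List.pyRange 0 w 1).any (fun c =>
            PySem.List.pyGetD (PySem.List.pyGetD grid r []) c 0 == grid_color) then
          ((if tb.1 = none then some r else tb.1), some r)
        else tb) (none, none)
    match tb.1 with
    | none => (none, none, none)
    | some t => (some grid_color, some t, tb.2)
  | _ => (none, none, none)

def find_grid_structure_py_alt (grid : List (List Int)) : Option Int × Option Int × Option Int :=
  let h : Int := (grid.length : Int)
  let w : Int := match grid with | [] => 0 | r0 :: _ => (r0.length : Int)
  let st : PySem.Set Int × Option Int × Option Int :=
    (PySem.List.pyRange 0 h 1).foldl (fun st r =>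
      (PySem.List.pyRange 0 w 1).foldl (fun st c =>
        if PySem.List.pyGetD (PySem.List.pyGetD grid r []) c 0 ≠ 0 then
          (PySem.Set.add st.1 (PySem.List.pyGetD (PySem.List.pyGetD grid r []) c 0),
           (if st.2.1 = none then some r else st.2.1), some r)
        else st) st) (PySem.Set.empty, none, none)
  match st.1 with
  | grid_color :: tl =>
    match tl with
    | [] => (some grid_color, st.2.1, st.2.2)
    | _ :: _ => (none, none, none)
  | [] => (none, none, none)

-- ===== PRECONDITION & SPEC =====
-- Pre_ excludes exactly the ragged grids on which A raises IndexError: some row shorter than the first row.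
def Pre_find_grid_structure_py (grid : List (List Int)) : Prop :=
  ∀ row ∈ grid, (grid.headD []).length ≤ row.length
instance (grid : List (List Int)) : Decidable (Pre_find_grid_structure_py grid) := by
  unfold Pre_find_grid_structure_py; infer_instance
def pvWitness_find_grid_structure_py : List (List Int) := [[0, 1], [1, 0]]

def Spec_find_grid_structure_py (grid : List (List Int)) (out : Option Int × Option Int × Option Int) : Prop := out = find_grid_structure_py_alt grid
instance (grid : List (List Int)) (out : Option Int × Option Int × Option Int) : Decidable (Spec_find_grid_structure_py grid out) := by unfold Spec_find_grid_structure_py; infer_instance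

-- ===== CLAIM (what is proved, stated in full; the proofs are below) =====
def Claim_equal_find_grid_structure_py : Prop := ∀ (grid : List (List Int)), Dom_find_grid_structure_py grid → Pre_find_grid_structure_py grid → Spec_find_grid_structure_py grid (find_grid_structure_py grid)

-- ===== LEMMAS AND PROOFS =====

-- the first/last update step shared by both programs' row-range tracking
def updTB (r : Int) (tb : Option Int × Option Int) : Option Int × Option Int :=
  ((if tb.1 = none then some r else tb.1), some r)

theorem foldl_range_getD_zip {α σ : Type} (xs : List α) (d : α) (f : σ → Nat → α → σ)
    (j : Nat) (init : σ) :
    (List.range xs.length).foldl (fun acc r => f acc (j + r) (xs.getD r d)) init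
      = (xs.zipIdx j).foldl (fun acc p => f acc p.2 p.1) init := by
  induction xs generalizing j init with
  | nil => simp
  | cons x t ih =>
    simp only [List.length_cons, List.range_succ_eq_map, List.foldl_cons, List.foldl_map,
      List.zipIdx_cons, List.getD_cons_zero, List.getD_cons_succ, Nat.add_zero]
    rw [show (fun (acc : σ) (r : Nat) => f acc (j + (r + 1)) (t.getD r d))
        = (fun acc r => f acc ((j + 1) + r) (t.getD r d)) by funext a r; ring_nf]
    exact ih (j+1) _

theorem foldl_pyRange_idx {α σ : Type} (xs : List α) (d : α) (f : σ → Int → α → σ) (init : σ) :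
    (PySem.List.pyRange 0 (xs.length : Int) 1).foldl
        (fun acc r => f acc r (PySem.List.pyGetD xs r d)) init
      = xs.zipIdx.foldl (fun acc p => f acc (p.2 : Int) p.1) init := by
  rw [PySem.List.pyRange_zero_natCast, List.foldl_map]
  have := foldl_range_getD_zip xs d (fun acc r v => f acc (r : Int) v) 0 init
  simp only [Nat.zero_add] at this
  rw [← this]
  simp [PySem.List.pyGetD_natCast]

theorem foldl_range_take {α σ : Type} (row : List α) (w : Nat) (hw : w ≤ row.length)
    (d : α) (f : σ → α → σ) (init : σ) :
    (List.range w).foldl (fun acc c => f acc (row.getD c d)) init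
      = (row.take w).foldl f init := by
  induction w with
  | zero => simp
  | succ n ih =>
    have hn : n < row.length := by omega
    rw [List.range_succ, List.foldl_append, ih (by omega), List.take_add_one,
      List.foldl_append]
    simp [List.getElem?_eq_getElem hn]

theorem any_range_take {α : Type} (row : List α) (w : Nat) (hw : w ≤ row.length)
    (d : α) (p : α → Bool) :
    (List.range w).any (fun c => p (row.getD c d)) = (row.take w).any p := by
  induction w with
  | zero => simp
  | succ n ih =>
    have hn : n < row.length := by omega
    rw [List.range_succ, List.any_append, ih (by omega), List.take_add_one, List.any_append]
    simp [List.getElem?_eq_getElem hn]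

def cellsNZ (w : Nat) (grid : List (List Int)) : List Int :=
  grid.flatMap (fun row => (row.take w).filter (fun v => decide (v ≠ 0)))

theorem colors_eq_ofList (w : Nat) (grid : List (List Int)) (init : PySem.Set Int) :
    grid.foldl (fun cs row =>
        (row.take w).foldl (fun cs v => if v ≠ 0 then PySem.Set.add cs v else cs) cs) init
      = (cellsNZ w grid).foldl PySem.Set.add init := by
  induction grid generalizing init with
  | nil => simp [cellsNZ]
  | cons row t ih =>
    simp only [List.foldl_cons, cellsNZ, List.flatMap_cons, List.foldl_append]
    rw [PySem.List.foldl_ite_eq_foldl_filter (fun v => v ≠ 0) PySem.Set.add _ init, ih]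
    rfl

theorem updTB_idem (r : Int) (tb : Option Int × Option Int) :
    updTB r (updTB r tb) = updTB r tb := by
  simp only [updTB]; split <;> simp_all

theorem updTB_fst_ne_none (r : Int) (tb : Option Int × Option Int) :
    (updTB r tb).1 ≠ none := by
  simp only [updTB]; split <;> simp_all

theorem foldl_if_updTB (l : List Int) (r : Int) (tb : Option Int × Option Int) :
    l.foldl (fun tb v => if v ≠ 0 then updTB r tb else tb) tb
      = if l.any (fun v => decide (v ≠ 0)) then updTB r tb else tb := by
  induction l generalizing tb with
  | nil => simp
  | cons v t ih =>
    simp only [List.foldl_cons, List.any_cons]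
    by_cases hv : v = 0
    · subst hv
      rw [if_neg (by simp), ih tb]
      simp
    · rw [if_pos hv, ih (updTB r tb)]
      have hd : decide (v ≠ 0) = true := by simp [hv]
      simp only [hd, Bool.true_or, if_true]
      split <;> simp [updTB_idem]

theorem tb_fold_fst_ne_none {β : Type} (rows : List β) (q : β → Bool) (idx : β → Int)
    (tb : Option Int × Option Int)
    (h : (∃ p ∈ rows, q p) ∨ tb.1 ≠ none) :
    (rows.foldl (fun tb p => if q p then updTB (idx p) tb else tb) tb).1 ≠ none := by
  induction rows generalizing tb with
  | nil =>
    simp only [List.foldl_nil]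
    rcases h with ⟨x, hx, _⟩ | h
    · simp at hx
    · exact h
  | cons p t ih =>
    simp only [List.foldl_cons]
    by_cases hq : q p = true
    · rw [if_pos hq]; exact ih _ (Or.inr (updTB_fst_ne_none _ _))
    · rw [if_neg hq]
      apply ih
      rcases h with ⟨x, hx, hqx⟩ | h
      · rcases List.mem_cons.mp hx with rfl | hx
        · exact absurd hqx hq
        · exact Or.inl ⟨x, hx, hqx⟩
      · exact Or.inr h

theorem inner_fold_take {σ : Type} (row : List Int) (w : Nat) (hw : w ≤ row.length)
    (f : σ → Int → σ) (init : σ) :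
    (PySem.List.pyRange 0 (w : Int) 1).foldl (fun acc c => f acc (PySem.List.pyGetD row c 0)) init
      = (row.take w).foldl f init := by
  rw [PySem.List.pyRange_zero_natCast, List.foldl_map]
  simp only [PySem.List.pyGetD_natCast]
  exact foldl_range_take row w hw 0 f init

theorem inner_any_take (row : List Int) (w : Nat) (hw : w ≤ row.length) (p : Int → Bool) :
    (PySem.List.pyRange 0 (w : Int) 1).any (fun c => p (PySem.List.pyGetD row c 0))
      = (row.take w).any p := by
  rw [PySem.List.pyRange_zero_natCast, List.any_map]
  simp only [Function.comp_def, PySem.List.pyGetD_natCast]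
  exact any_range_take row w hw 0 p

theorem inner_split (l : List Int) (r : Int) (st : PySem.Set Int × Option Int × Option Int) :
    l.foldl (fun st v => if v ≠ 0 then
        (PySem.Set.add st.1 v, (if st.2.1 = none then some r else st.2.1), some r) else st) st
      = (l.foldl (fun cs v => if v ≠ 0 then PySem.Set.add cs v else cs) st.1,
         l.foldl (fun tb v => if v ≠ 0 then updTB r tb else tb) st.2) := by
  induction l generalizing st with
  | nil => simp
  | cons v t ih =>
    by_cases hv : v = 0
    · subst hv
      rw [List.foldl_cons, if_neg (show ¬((0:Int) ≠ 0) by simp)]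
      exact ih st
    · simp only [List.foldl_cons, if_pos hv]
      rw [ih]
      rfl

theorem colors_zip_eq (w : Nat) (grid : List (List Int)) (init : PySem.Set Int) :
    grid.zipIdx.foldl (fun cs p =>
        (p.1.take w).foldl (fun cs v => if v ≠ 0 then PySem.Set.add cs v else cs) cs) init
      = (cellsNZ w grid).foldl PySem.Set.add init := by
  have h := List.foldl_map (f := (Prod.fst : List Int × Nat → List Int))
    (g := fun cs row => (row.take w).foldl (fun cs v => if v ≠ 0 then PySem.Set.add cs v else cs) cs)
    (l := grid.zipIdx) (init := init)
  rw [List.zipIdx_map_fst] at h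
  rw [← h]
  exact colors_eq_ofList w grid init

theorem mem_cellsNZ (w : Nat) (grid : List (List Int)) (v : Int) :
    v ∈ cellsNZ w grid ↔ ∃ row ∈ grid, v ∈ row.take w ∧ v ≠ 0 := by
  simp [cellsNZ, List.mem_flatMap, List.mem_filter]

theorem ports_eq_cons (r0 : List Int) (rest : List (List Int))
    (hw : ∀ row ∈ (r0 :: rest), r0.length ≤ row.length) :
    find_grid_structure_py (r0 :: rest) = find_grid_structure_py_alt (r0 :: rest) := by
  simp only [find_grid_structure_py, find_grid_structure_py_alt]
  rw [foldl_pyRange_idx (xs := r0 :: rest) (d := []) (init := ((PySem.Set.empty : PySem.Set Int), (none : Option Int), (none : Option Int)))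
      (f := fun st (r : Int) row =>
        (PySem.List.pyRange 0 (r0.length : Int) 1).foldl (fun st c =>
          if PySem.List.pyGetD row c 0 ≠ 0 then
            (PySem.Set.add st.1 (PySem.List.pyGetD row c 0),
             (if st.2.1 = none then some r else st.2.1), some r)
          else st) st)]
  rw [PySem.List.foldl_congr_mem ((r0 :: rest).zipIdx) _
      (fun (st : PySem.Set Int × Option Int × Option Int) (p : List Int × Nat) =>
        ((p.1.take r0.length).foldl (fun cs v => if v ≠ 0 then PySem.Set.add cs v else cs) st.1,
         (p.1.take r0.length).foldl (fun tb v => if v ≠ 0 then updTB (p.2 : Int) tb else tb) st.2))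
      _ (by
        intro st p hp
        have hrow : p.1 ∈ (r0 :: rest) := by
          have := List.mem_zipIdx_iff_getElem?.mp hp
          exact List.mem_of_getElem? this
        have hlen : r0.length ≤ p.1.length := hw p.1 hrow
        rw [inner_fold_take p.1 r0.length hlen
          (fun st v => if v ≠ 0 then
            (PySem.Set.add st.1 v, (if st.2.1 = none then some (p.2:Int) else st.2.1), some (p.2:Int)) else st) st]
        exact inner_split (p.1.take r0.length) (p.2 : Int) st)]
  rw [PySem.List.foldl_prod_mk
      (f := fun (cs : PySem.Set Int) (p : List Int × Nat) =>
        (p.1.take r0.length).foldl (fun cs v => if v ≠ 0 then PySem.Set.add cs v else cs) cs)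
      (g := fun (tb : Option Int × Option Int) (p : List Int × Nat) =>
        (p.1.take r0.length).foldl (fun tb v => if v ≠ 0 then updTB (p.2 : Int) tb else tb) tb)]
  rw [foldl_pyRange_idx (xs := r0 :: rest) (d := []) (init := (PySem.Set.empty : PySem.Set Int))
      (f := fun (cs : PySem.Set Int) (r : Int) row =>
        (PySem.List.pyRange 0 (r0.length : Int) 1).foldl (fun cs c =>
          if PySem.List.pyGetD row c 0 ≠ 0 then
            PySem.Set.add cs (PySem.List.pyGetD row c 0)
          else cs) cs)]
  rw [PySem.List.foldl_congr_mem ((r0 :: rest).zipIdx) _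
      (fun (cs : PySem.Set Int) (p : List Int × Nat) =>
        (p.1.take r0.length).foldl (fun cs v => if v ≠ 0 then PySem.Set.add cs v else cs) cs)
      PySem.Set.empty (by
        intro cs p hp
        have hrow : p.1 ∈ (r0 :: rest) := List.mem_of_getElem? (List.mem_zipIdx_iff_getElem?.mp hp)
        exact inner_fold_take p.1 r0.length (hw p.1 hrow)
          (fun cs v => if v ≠ 0 then PySem.Set.add cs v else cs) cs)]
  rw [colors_zip_eq r0.length (r0 :: rest) PySem.Set.empty]
  rw [PySem.List.foldl_congr_mem ((r0 :: rest).zipIdx) _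
      (fun (tb : Option Int × Option Int) (p : List Int × Nat) =>
        if (p.1.take r0.length).any (fun v => decide (v ≠ 0)) then updTB (p.2 : Int) tb else tb)
      (none, none) (by
        intro tb p hp
        exact foldl_if_updTB (p.1.take r0.length) (p.2 : Int) tb)]
  dsimp only
  rcases hS : List.foldl PySem.Set.add PySem.Set.empty (cellsNZ r0.length (r0 :: rest))
    with _ | ⟨gc, _ | ⟨c2, tl⟩⟩
  · rfl
  · -- singleton color
    have hofl : PySem.Set.ofList (cellsNZ r0.length (r0 :: rest)) = [gc] := by
      rw [PySem.Set.ofList_eq_foldl]; exact hS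
    have hmemS : ∀ v : Int, v ∈ cellsNZ r0.length (r0 :: rest) → v = gc := by
      intro v hv
      have : v ∈ PySem.Set.ofList (cellsNZ r0.length (r0 :: rest)) :=
        (PySem.Set.mem_ofList _ _).mpr hv
      rw [hofl] at this; simpa using this
    have hgc : gc ∈ cellsNZ r0.length (r0 :: rest) := by
      have : gc ∈ PySem.Set.ofList (cellsNZ r0.length (r0 :: rest)) := by rw [hofl]; simp
      exact (PySem.Set.mem_ofList _ _).mp this
    obtain ⟨row0, hrow0, hgcrow, hgc0⟩ := (mem_cellsNZ _ _ _).mp hgc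
    dsimp only
    rw [foldl_pyRange_idx (xs := r0 :: rest) (d := []) (init := ((none : Option Int), (none : Option Int)))
        (f := fun (tb : Option Int × Option Int) (r : Int) row =>
          if ((PySem.List.pyRange 0 (r0.length : Int) 1).any fun c =>
              PySem.List.pyGetD row c 0 == gc) = true then
            ((if tb.1 = none then some r else tb.1), some r)
          else tb)]
    rw [PySem.List.foldl_congr_mem ((r0 :: rest).zipIdx) _
        (fun (tb : Option Int × Option Int) (p : List Int × Nat) =>
          if ((p.1.take r0.length).any fun v => decide (v ≠ 0)) = true then updTB (p.2 : Int) tb else tb)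
        (none, none) (by
          intro tb p hp
          have hrow : p.1 ∈ (r0 :: rest) := List.mem_of_getElem? (List.mem_zipIdx_iff_getElem?.mp hp)
          rw [inner_any_take p.1 r0.length (hw p.1 hrow) (fun v => v == gc)]
          rw [PySem.List.any_congr_mem (f := fun v => v == gc) (g := fun v => decide (v ≠ 0)) (by
            intro v hv
            by_cases hv0 : v = 0
            · subst hv0
              simp [(Ne.symm hgc0)]
            · have : v = gc := hmemS v ((mem_cellsNZ _ _ _).mpr ⟨p.1, hrow, hv, hv0⟩)
              subst this
              simp [hgc0])]
          rfl)]
    have hne : (List.foldl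
        (fun (tb : Option Int × Option Int) (p : List Int × Nat) =>
          if ((p.1.take r0.length).any fun v => decide (v ≠ 0)) = true then updTB (p.2 : Int) tb else tb)
        (none, none) ((r0 :: rest).zipIdx)).1 ≠ none := by
      apply tb_fold_fst_ne_none ((r0 :: rest).zipIdx)
        (fun p => (p.1.take r0.length).any fun v => decide (v ≠ 0)) (fun p => (p.2 : Int))
      left
      obtain ⟨i, hi, hEq⟩ := List.mem_iff_getElem.mp hrow0
      refine ⟨(row0, i), ?_, ?_⟩
      · rw [List.mem_zipIdx_iff_getElem?]
        simp [List.getElem?_eq_getElem hi, hEq]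
      · simp only [List.any_eq_true]
        exact ⟨gc, hgcrow, by simp [hgc0]⟩
    generalize go : (List.foldl
        (fun (tb : Option Int × Option Int) (p : List Int × Nat) =>
          if ((p.1.take r0.length).any fun v => decide (v ≠ 0)) = true then updTB (p.2 : Int) tb else tb)
        (none, none) ((r0 :: rest).zipIdx)).1 = o at hne ⊢
    cases o with
    | none => exact absurd rfl hne
    | some t => rfl
  · rfl

-- ===== VERDICT (by name: the statement is the Claim_ definition above) =====
theorem find_grid_structure_py_spec : Claim_equal_find_grid_structure_py := by
  intro grid _ hpre
  unfold Spec_find_grid_structure_py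
  cases grid with
  | nil => rfl
  | cons r0 rest =>
    have hw : ∀ row ∈ (r0 :: rest), r0.length ≤ row.length := by
      simpa [Pre_find_grid_structure_py] using hpre
    exact ports_eq_cons r0 rest hw
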